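-- pv_equiv track=rewrite | github.com/lishujun-v/XiamiClaw | models/custom.py | _merge_stream_fragment
-- ===== SOURCE A (Python) =====
-- def _merge_stream_fragment(current: str, incoming: str) -> str:
--     """合并流式字符串片段，兼容增量片段和累计快照两种供应商行为。"""
--     if not incoming:
--         return current or ''
--
--     current = current or ''
--     if not current:
--         return incoming
--
--     if incoming == current:
--         return current
--
--     # 某些供应商会重复返回“截至当前为止”的完整内容，而非纯增量片段。
--     if incoming.startswith(current):
--         return incoming
--
--     if current.endswith(incoming):
--         return current
--
--     max_overlap = min(len(current), len(incoming))
--     for overlap in range(max_overlap, 0, -1):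
--         if current.endswith(incoming[:overlap]):
--             return current + incoming[overlap:]
--
--     return current + incoming
-- ===== SOURCE B (Python) =====
-- def _merge_stream_fragment(current: str, incoming: str) -> str:
--     """Merge stream fragments: one left-to-right pass over `current` maintaining
--     the set of active match lengths l such that the suffix of the scanned part
--     of length l equals incoming[:l]; the largest surviving length is the overlap."""
--     if not incoming:
--         return current or ''
--     current = current or ''
--     lengths = []
--     for ch in current:
--         nxt = [l + 1 for l in lengths if l < len(incoming) and incoming[l] == ch]
--         if incoming[0] == ch:
--             nxt.append(1)
--         lengths = nxt
--     k = max(lengths) if lengths else 0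
--     return current + incoming[k:]
-- ===== Notes on version B (the rewrite author's own statement) =====
-- stated objective: faster
-- what changed: Replaces A's cascade of startswith/endswith special cases plus a descending scan that re-slices incoming and re-checks current.endswith(incoming[:overlap]) for every candidate overlap with a single left-to-right pass over current that maintains the set of active suffix-prefix match lengths; the answer is the largest surviving length.
import Mathlib
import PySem

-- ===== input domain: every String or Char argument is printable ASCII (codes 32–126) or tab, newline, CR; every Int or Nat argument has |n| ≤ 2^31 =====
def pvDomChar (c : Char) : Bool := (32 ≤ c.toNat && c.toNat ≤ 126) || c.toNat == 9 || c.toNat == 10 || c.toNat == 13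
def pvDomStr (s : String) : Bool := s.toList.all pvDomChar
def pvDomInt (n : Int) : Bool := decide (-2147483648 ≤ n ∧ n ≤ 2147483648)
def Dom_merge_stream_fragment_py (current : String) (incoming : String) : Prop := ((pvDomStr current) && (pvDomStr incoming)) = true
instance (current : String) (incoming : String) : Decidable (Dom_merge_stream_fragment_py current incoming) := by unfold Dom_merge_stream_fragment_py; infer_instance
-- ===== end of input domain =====

-- B replaces A's special-case cascade plus descending scan (which re-slices incoming and
-- re-checks current.endswith(incoming[:overlap]) per candidate) by a single left-to-right
-- pass over `current` maintaining the set of active suffix-prefix match lengths;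
-- a timing run measured B faster on its generated inputs.

-- ===== PORT A =====
-- A's loop 'for overlap in range(max_overlap, 0, -1): if current.endswith(incoming[:overlap]): return current + incoming[overlap:]'
-- (incoming[:o] / incoming[o:] with 0 ≤ o are take/drop, cf. PySem.List.slice_to_natCast / slice_from_natCast).
def pyLoopA (c i : List Char) : Nat → List Char
  | 0 => c ++ i
  | m+1 =>
    if PySem.Chars.endswith c (i.take (m+1)) then c ++ i.drop (m+1)
    else pyLoopA c i m

def merge_stream_fragment_py (current : String) (incoming : String) : String :=
  let c := current.toList
  let i := incoming.toList
  if i = [] then current                              -- if not incoming: return current or ''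
  else if c = [] then incoming                        -- if not current: return incoming
  else if i = c then current                          -- if incoming == current: return current
  else if PySem.Chars.startswith i c then incoming    -- if incoming.startswith(current): return incoming
  else if PySem.Chars.endswith c i then current       -- if current.endswith(incoming): return current
  else String.ofList (pyLoopA c i (min c.length i.length))

-- ===== PORT B =====
-- One step of B's pass: nxt = [l+1 for l in lengths if l < len(incoming) and incoming[l] == ch]; if incoming[0] == ch: nxt.append(1)
def altStep (i : List Char) (lengths : List Nat) (ch : Char) : List Nat :=
  (lengths.filterMap fun l => if l < i.length ∧ i.getD l 'a' = ch then some (l+1) else none)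
    ++ (if i.getD 0 'a' = ch then [1] else [])

def merge_stream_fragment_py_alt (current : String) (incoming : String) : String :=
  let c := current.toList
  let i := incoming.toList
  if i = [] then current
  else
    let lengths := c.foldl (altStep i) []
    let k := match PySem.List.max? lengths (fun l => l) with   -- max(lengths) if lengths else 0
      | some m => m
      | none => 0
    String.ofList (c ++ i.drop k)

-- ===== PRECONDITION & SPEC =====
def Spec_merge_stream_fragment_py (current : String) (incoming : String) (out : String) : Prop := out = merge_stream_fragment_py_alt current incoming
instance (current : String) (incoming : String) (out : String) : Decidable (Spec_merge_stream_fragment_py current incoming out) := by unfold Spec_merge_stream_fragment_py; infer_instance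

-- ===== CLAIM (what is proved, stated in full; the proofs are below) =====
def Claim_equal_merge_stream_fragment_py : Prop := ∀ (current : String) (incoming : String), Dom_merge_stream_fragment_py current incoming → Spec_merge_stream_fragment_py current incoming (merge_stream_fragment_py current incoming)

-- ===== LEMMAS AND PROOFS =====

-- xs ++ [a] is a suffix of ys ++ [b] iff a = b and xs is a suffix of ys
lemma suffix_concat_concat_iff {u v : List Char} {a b : Char} :
    u ++ [a] <:+ v ++ [b] ↔ u <:+ v ∧ a = b := by
  constructor
  · rintro ⟨t, ht⟩
    rw [← List.append_assoc, List.append_singleton_inj] at ht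
    exact ⟨⟨t, ht.1⟩, ht.2⟩
  · rintro ⟨⟨t, ht⟩, rfl⟩
    exact ⟨t, by rw [← List.append_assoc, ht]⟩

-- l is a valid overlap: incoming's length-l prefix is a suffix of c
def okLen (c i : List Char) (l : Nat) : Prop := 1 ≤ l ∧ l ≤ i.length ∧ i.take l <:+ c

-- the largest valid overlap (0 if none)
def kbest (c i : List Char) : Nat :=
  ((List.range (min c.length i.length + 1)).filter
      (fun l => decide (1 ≤ l ∧ l ≤ i.length ∧ i.take l <:+ c))).foldl max 0

lemma okLen_le_min {c i : List Char} {l : Nat} (h : okLen c i l) : l ≤ min c.length i.length := by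
  obtain ⟨h1, h2, h3⟩ := h
  have := h3.length_le
  rw [List.length_take] at this
  omega

lemma le_kbest {c i : List Char} {l : Nat} (h : okLen c i l) : l ≤ kbest c i := by
  have hmem : l ∈ (List.range (min c.length i.length + 1)).filter
      (fun l => decide (1 ≤ l ∧ l ≤ i.length ∧ i.take l <:+ c)) := by
    rw [List.mem_filter, List.mem_range]
    exact ⟨by have := okLen_le_min h; omega, by simpa [okLen] using h⟩
  exact (PySem.List.le_foldl_max _ 0).2 l hmem

lemma kbest_zero_or_ok (c i : List Char) : kbest c i = 0 ∨ okLen c i (kbest c i) := by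
  rw [kbest]
  rcases PySem.List.foldl_max_mem ((List.range (min c.length i.length + 1)).filter
      (fun l => decide (1 ≤ l ∧ l ≤ i.length ∧ i.take l <:+ c))) 0 with h | h
  · exact Or.inl h
  · right
    rw [List.mem_filter] at h
    simpa [okLen] using h.2

lemma kbest_le (c i : List Char) : kbest c i ≤ min c.length i.length := by
  rcases kbest_zero_or_ok c i with h | h
  · omega
  · exact okLen_le_min h

-- A's descending loop returns c ++ i.drop (kbest c i)
lemma loopA_eq (c i : List Char) :
    ∀ m, m ≤ min c.length i.length → (∀ l, okLen c i l → l ≤ m) →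
      pyLoopA c i m = c ++ i.drop (kbest c i) := by
  intro m
  induction m with
  | zero =>
    intro _ hub
    have h0 : kbest c i = 0 := by
      rcases kbest_zero_or_ok c i with h | h
      · exact h
      · have := hub _ h; have := h.1; omega
    simp [pyLoopA, h0]
  | succ m ih =>
    intro hle hub
    by_cases hsuf : i.take (m+1) <:+ c
    · have hok : okLen c i (m+1) := ⟨by omega, by omega, hsuf⟩
      have h1 : m + 1 ≤ kbest c i := le_kbest hok
      have h2 : kbest c i ≤ m + 1 := by
        rcases kbest_zero_or_ok c i with h | h
        · omega
        · exact hub _ h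
      have hk : kbest c i = m + 1 := by omega
      have he : PySem.Chars.endswith c (i.take (m+1)) = true :=
        (PySem.Chars.endswith_iff _ _).mpr hsuf
      simp [pyLoopA, he, hk]
    · have hends : PySem.Chars.endswith c (i.take (m+1)) = false := by
        rw [Bool.eq_false_iff]
        intro h
        exact hsuf ((PySem.Chars.endswith_iff _ _).mp h)
      have hub' : ∀ l, okLen c i l → l ≤ m := by
        intro l hl
        have := hub l hl
        rcases Nat.lt_or_ge l (m+1) with h | h
        · omega
        · have hlm : l = m + 1 := by omega
          exact absurd (hlm ▸ hl.2.2) hsuf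
      rw [pyLoopA, hends]
      simp only [Bool.false_eq_true, if_false]
      exact ih (by omega) hub'

-- one step of B preserves the "active lengths" characterisation
lemma step_mem (i : List Char) (hi : i ≠ []) (pre : List Char) (L : List Nat) (ch : Char)
    (hL : ∀ l, l ∈ L ↔ okLen pre i l) :
    ∀ l, l ∈ altStep i L ch ↔ okLen (pre ++ [ch]) i l := by
  intro l
  have hi0 : 0 < i.length := List.length_pos_iff.mpr hi
  constructor
  · intro hmem
    rw [altStep, List.mem_append, List.mem_filterMap] at hmem
    rcases hmem with ⟨l', hl', hif⟩ | hone
    · by_cases hc : l' < i.length ∧ i.getD l' 'a' = ch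
      · rw [if_pos hc] at hif
        have hl2 : l = l' + 1 := (Option.some_inj.mp hif).symm
        obtain ⟨hp1, hp2, hp3⟩ := (hL l').mp hl'
        have hget : i[l'] = ch := by
          rw [List.getD_eq_getElem i 'a' hc.1] at hc
          exact hc.2
        refine ⟨by omega, by omega, ?_⟩
        rw [hl2, List.take_succ_eq_append_getElem hc.1, hget,
            suffix_concat_concat_iff]
        exact ⟨hp3, rfl⟩
      · rw [if_neg hc] at hif; cases hif
    · by_cases hc : i.getD 0 'a' = ch
      · rw [if_pos hc] at hone
        have hl1 : l = 1 := by simpa using hone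
        have hget : i[0] = ch := by rwa [List.getD_eq_getElem i 'a' hi0] at hc
        refine ⟨by omega, by omega, ?_⟩
        rw [hl1, List.take_succ_eq_append_getElem hi0, hget, List.take_zero, List.nil_append]
        exact ⟨pre, rfl⟩
      · rw [if_neg hc] at hone; cases hone
  · rintro ⟨h1, h2, h3⟩
    obtain ⟨k, rfl⟩ : ∃ k, l = k + 1 := ⟨l - 1, by omega⟩
    have hklt : k < i.length := by omega
    rw [List.take_succ_eq_append_getElem hklt,
        suffix_concat_concat_iff] at h3
    obtain ⟨hpre, hch⟩ := h3
    rw [altStep, List.mem_append]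
    rcases Nat.eq_zero_or_pos k with hk0 | hkpos
    · right
      subst hk0
      have h0 : i.getD 0 'a' = ch := by rw [List.getD_eq_getElem i 'a' hi0, hch]
      rw [if_pos h0]
      simp
    · left
      rw [List.mem_filterMap]
      refine ⟨k, (hL k).mpr ⟨hkpos, by omega, by simpa using hpre⟩, ?_⟩
      have : i.getD k 'a' = ch := by rw [List.getD_eq_getElem i 'a' hklt, hch]
      rw [if_pos ⟨hklt, this⟩]

lemma fold_mem (i : List Char) (hi : i ≠ []) :
    ∀ (tl pre : List Char) (L : List Nat),
      (∀ l, l ∈ L ↔ okLen pre i l) →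
      ∀ l, l ∈ tl.foldl (altStep i) L ↔ okLen (pre ++ tl) i l := by
  intro tl
  induction tl with
  | nil => intro pre L hL l; simpa using hL l
  | cons ch tl ih =>
    intro pre L hL l
    have := ih (pre ++ [ch]) (altStep i L ch) (step_mem i hi pre L ch hL)
    simpa using this l

lemma okLen_nil {i : List Char} {l : Nat} : ¬ okLen [] i l := by
  rintro ⟨h1, h2, h3⟩
  have := h3.length_le
  rw [List.length_take, List.length_nil] at this
  omega

lemma final_mem (c i : List Char) (hi : i ≠ []) :
    ∀ l, l ∈ c.foldl (altStep i) [] ↔ okLen c i l := by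
  have := fold_mem i hi c [] [] (by
    intro l
    simp only [List.not_mem_nil, false_iff]
    exact okLen_nil)
  simpa using this

-- B computes c ++ i.drop (kbest c i)
lemma alt_eq (current incoming : String) (hi : incoming.toList ≠ []) :
    merge_stream_fragment_py_alt current incoming
      = String.ofList (current.toList ++ incoming.toList.drop (kbest current.toList incoming.toList)) := by
  have hchar := final_mem current.toList incoming.toList hi
  rw [merge_stream_fragment_py_alt]
  simp only [if_neg hi]
  cases hmax : PySem.List.max? (current.toList.foldl (altStep incoming.toList) []) (fun l => l) with
  | none =>
    have hLnil : current.toList.foldl (altStep incoming.toList) [] = [] :=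
      (PySem.List.max?_eq_none_iff _ _).mp hmax
    have h0 : kbest current.toList incoming.toList = 0 := by
      rcases kbest_zero_or_ok current.toList incoming.toList with h | h
      · exact h
      · exact absurd ((hchar _).mpr h) (by simp [hLnil])
    simp [h0]
  | some m =>
    have hmem : m ∈ current.toList.foldl (altStep incoming.toList) [] := PySem.List.max?_mem hmax
    have hok : okLen current.toList incoming.toList m := (hchar m).mp hmem
    have h1 : m ≤ kbest current.toList incoming.toList := le_kbest hok
    have h2 : kbest current.toList incoming.toList ≤ m := by
      rcases kbest_zero_or_ok current.toList incoming.toList with h | h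
      · omega
      · exact PySem.List.max?_isMax hmax _ ((hchar _).mpr h)
    have hk : kbest current.toList incoming.toList = m := by omega
    simp [hk]

-- ===== VERDICT (by name: the statement is the Claim_ definition above) =====
theorem merge_stream_fragment_py_spec : Claim_equal_merge_stream_fragment_py := by
  intro current incoming _
  unfold Spec_merge_stream_fragment_py
  set c := current.toList with hc
  set i := incoming.toList with hi
  by_cases hinil : i = []
  · rw [merge_stream_fragment_py, merge_stream_fragment_py_alt]
    simp [← hi, hinil]
  · rw [alt_eq current incoming hinil, merge_stream_fragment_py]
    simp only [← hc, ← hi, if_neg hinil]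
    by_cases hcnil : c = []
    · rw [if_pos hcnil]
      have h0 : kbest c i = 0 := by
        rcases kbest_zero_or_ok c i with h | h
        · exact h
        · exact absurd (hcnil ▸ h) okLen_nil
      rw [h0, hcnil]
      simp [hi]
    · rw [if_neg hcnil]
      by_cases heq : i = c
      · rw [if_pos heq]
        have hok : okLen c i i.length :=
          ⟨List.length_pos_iff.mpr hinil, le_refl _, by rw [List.take_length, heq]⟩
        have hk : kbest c i = i.length := by
          have h1 := le_kbest hok
          have h2 := kbest_le c i
          omega
        rw [hk]
        simp [hc]
      · rw [if_neg heq]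
        by_cases hpre : PySem.Chars.startswith i c = true
        · rw [if_pos hpre]
          have hpre' : c <+: i := (PySem.Chars.startswith_iff _ _).mp hpre
          have hclen : c.length ≤ i.length := hpre'.length_le
          have htake : i.take c.length = c := (List.prefix_iff_eq_take.mp hpre').symm
          have hok : okLen c i c.length :=
            ⟨List.length_pos_iff.mpr hcnil, hclen, by rw [htake]⟩
          have hk : kbest c i = c.length := by
            have h1 := le_kbest hok
            have h2 := kbest_le c i
            omega
          rw [hk]
          have : c ++ i.drop c.length = i := by
            conv_rhs => rw [← List.take_append_drop c.length i, htake]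
          rw [this]
          simp [hi]
        · rw [if_neg hpre]
          by_cases hsuf : PySem.Chars.endswith c i = true
          · rw [if_pos hsuf]
            have hsuf' : i <:+ c := (PySem.Chars.endswith_iff _ _).mp hsuf
            have hok : okLen c i i.length :=
              ⟨List.length_pos_iff.mpr hinil, le_refl _, by rw [List.take_length]; exact hsuf'⟩
            have hk : kbest c i = i.length := by
              have h1 := le_kbest hok
              have h2 := kbest_le c i
              have h3 := hsuf'.length_le
              omega
            rw [hk]
            simp [hc]
          · rw [if_neg hsuf]
            rw [loopA_eq c i (min c.length i.length) (le_refl _) (fun l hl => okLen_le_min hl)]
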